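-- pv_equiv track=rewrite | github.com/qzhello/tools | tools/json/prettify.py | _bad_token_span
-- ===== SOURCE A (Python) =====
-- def _bad_token_span(line: str, col: int) -> tuple:
--     """返回错误位置的 (start, end) 字符索引（半开区间，0-based）。
--
--     word/数字字符向两侧扩展，标点/空白只标 1 个字符。
--     """
--     idx = max(0, min(col - 1, len(line) - 1)) if line else 0
--     if not line:
--         return (0, 1)
--     ch = line[idx]
--     is_word = lambda c: c.isalnum() or c == "_"
--     if is_word(ch):
--         s = idx
--         while s > 0 and is_word(line[s - 1]):
--             s -= 1
--         e = idx
--         while e < len(line) and is_word(line[e]):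
--             e += 1
--         return (s, e)
--     return (idx, idx + 1)
-- ===== SOURCE B (Python) =====
-- def _bad_token_span(line: str, col: int) -> tuple:
--     """Same result as A: single forward scan tracking the current run start,
--     instead of bidirectional expansion from idx."""
--     if not line:
--         return (0, 1)
--     n = len(line)
--     idx = max(0, min(col - 1, n - 1))
--     is_word = lambda c: c.isalnum() or c == "_"
--     if not is_word(line[idx]):
--         return (idx, idx + 1)
--     start = 0
--     for i, c in enumerate(line):
--         if not is_word(c):
--             if start <= idx < i:
--                 return (start, i)
--             start = i + 1
--     return (start, n)
-- ===== Notes on version B (the rewrite author's own statement) =====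
-- stated objective: alternative
-- what changed: A expands bidirectionally from the clamped index with two while loops; B does one left-to-right scan over enumerate(line) tracking the start of the current word run and returns the run containing idx.
import Mathlib
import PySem

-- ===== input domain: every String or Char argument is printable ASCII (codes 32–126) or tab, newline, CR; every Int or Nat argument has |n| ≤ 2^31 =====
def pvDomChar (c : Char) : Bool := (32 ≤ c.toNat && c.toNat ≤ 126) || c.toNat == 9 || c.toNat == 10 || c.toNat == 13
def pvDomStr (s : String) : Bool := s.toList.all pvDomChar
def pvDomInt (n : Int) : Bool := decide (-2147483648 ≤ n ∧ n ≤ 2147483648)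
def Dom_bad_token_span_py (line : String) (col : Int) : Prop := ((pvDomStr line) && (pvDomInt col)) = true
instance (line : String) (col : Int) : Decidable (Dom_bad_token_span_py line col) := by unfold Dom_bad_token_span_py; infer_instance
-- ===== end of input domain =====

-- B replaces A's two outward while-loops with one forward scan tracking the current run start (objective: alternative; same result).

-- ===== PORT A =====
-- is_word = lambda c: c.isalnum() or c == "_"
def pvWordy (c : Char) : Bool := PySem.Chars.isalnum c || c == '_'

-- while s > 0 and is_word(line[s-1]): s -= 1
def pvSLoop (cs : List Char) : Nat → Nat
  | 0 => 0
  | s + 1 => if pvWordy (cs.getD s ' ') then pvSLoop cs s else s + 1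

-- while e < len(line) and is_word(line[e]): e += 1
def pvELoop (cs : List Char) (e : Nat) : Nat :=
  if e < cs.length ∧ pvWordy (cs.getD e ' ') = true then pvELoop cs (e + 1) else e
termination_by cs.length - e
decreasing_by omega

def bad_token_span_py (line : String) (col : Int) : Int × Int :=
  let cs := line.toList
  -- idx = max(0, min(col - 1, len(line) - 1)) if line else 0
  let idx : Int := if cs ≠ [] then max 0 (min (col - 1) ((cs.length : Int) - 1)) else 0
  if cs = [] then (0, 1)
  else
    -- exact: line is nonempty here, so 0 ≤ idx < len(line); Python's line[idx] never raises and never wraps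
    let i : Nat := idx.toNat
    let ch := cs.getD i ' '
    if pvWordy ch then ((pvSLoop cs i : Int), (pvELoop cs i : Int))
    else ((i : Int), (i : Int) + 1)

-- ===== PORT B =====
-- for i, c in enumerate(line): … (Nat-indexed enumeration of the remaining suffix, starting at k)
def pvEnum : Nat → List Char → List (Nat × Char)
  | _, [] => []
  | k, c :: rest => (k, c) :: pvEnum (k + 1) rest

-- the loop body of B: scan left to right, `start` = start of the current run
def pvScanB (idx n : Nat) : List (Nat × Char) → Nat → Nat × Nat
  | [], start => (start, n)
  | (i, c) :: rest, start =>
    if pvWordy c then pvScanB idx n rest start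
    else if start ≤ idx ∧ idx < i then (start, i)
    else pvScanB idx n rest (i + 1)

def bad_token_span_py_alt (line : String) (col : Int) : Int × Int :=
  let cs := line.toList
  if cs = [] then (0, 1)
  else
    let n := cs.length
    let idx : Nat := (max 0 (min (col - 1) ((n : Int) - 1))).toNat
    if ¬ pvWordy (cs.getD idx ' ') then ((idx : Int), (idx : Int) + 1)
    else
      let p := pvScanB idx n (pvEnum 0 cs) 0
      ((p.1 : Int), (p.2 : Int))

-- ===== PRECONDITION & SPEC =====
def Spec_bad_token_span_py (line : String) (col : Int) (out : Int × Int) : Prop := out = bad_token_span_py_alt line col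
instance (line : String) (col : Int) (out : Int × Int) : Decidable (Spec_bad_token_span_py line col out) := by unfold Spec_bad_token_span_py; infer_instance

-- ===== CLAIM (what is proved, stated in full; the proofs are below) =====
def Claim_equal_bad_token_span_py : Prop := ∀ (line : String) (col : Int), Dom_bad_token_span_py line col → Spec_bad_token_span_py line col (bad_token_span_py line col)

-- ===== LEMMAS AND PROOFS =====

-- characterization of the answer when line[idx] is a word char: (s, e) delimits the maximal word run containing idx
def pvGood (cs : List Char) (idx s e : Nat) : Prop :=
  s ≤ idx ∧ idx < e ∧ e ≤ cs.length ∧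
  (∀ j, s ≤ j → j < e → pvWordy (cs.getD j ' ') = true) ∧
  (s = 0 ∨ pvWordy (cs.getD (s - 1) ' ') = false) ∧
  (e = cs.length ∨ pvWordy (cs.getD e ' ') = false)

lemma pvGood_unique (cs : List Char) (idx s e s' e' : Nat)
    (h : pvGood cs idx s e) (h' : pvGood cs idx s' e') : s = s' ∧ e = e' := by
  obtain ⟨hs, he, hen, hall, hsb, heb⟩ := h
  obtain ⟨hs', he', hen', hall', hsb', heb'⟩ := h'
  constructor
  · by_contra hne
    rcases Nat.lt_or_ge s s' with hlt | hge
    · rcases hsb' with h0 | hnb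
      · omega
      · have := hall (s' - 1) (by omega) (by omega)
        rw [this] at hnb; simp at hnb
    · have hlt : s' < s := by omega
      rcases hsb with h0 | hnb
      · omega
      · have := hall' (s - 1) (by omega) (by omega)
        rw [this] at hnb; simp at hnb
  · by_contra hne
    rcases Nat.lt_or_ge e e' with hlt | hge
    · rcases heb with h0 | hnb
      · omega
      · have := hall' e (by omega) (by omega)
        rw [this] at hnb; simp at hnb
    · have hlt : e' < e := by omega
      rcases heb' with h0 | hnb
      · omega
      · have := hall e' (by omega) (by omega)
        rw [this] at hnb; simp at hnb

lemma pvSLoop_props (cs : List Char) (idx : Nat) :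
    pvSLoop cs idx ≤ idx ∧
    (∀ j, pvSLoop cs idx ≤ j → j < idx → pvWordy (cs.getD j ' ') = true) ∧
    (pvSLoop cs idx = 0 ∨ pvWordy (cs.getD (pvSLoop cs idx - 1) ' ') = false) := by
  induction idx with
  | zero => simp [pvSLoop]
  | succ s ih =>
    by_cases hw : pvWordy (cs.getD s ' ') = true
    · have hw' : pvWordy (cs[s]?.getD ' ') = true := by simpa using hw
      have hstep : pvSLoop cs (s + 1) = pvSLoop cs s := by simp [pvSLoop, hw']
      obtain ⟨h1, h2, h3⟩ := ih
      rw [hstep]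
      refine ⟨by omega, ?_, h3⟩
      intro j hj1 hj2
      rcases Nat.lt_or_ge j s with h | h
      · exact h2 j hj1 h
      · have : j = s := by omega
        simpa [this] using hw
    · have hwf : pvWordy (cs[s]?.getD ' ') = false := by
        rcases Bool.eq_false_or_eq_true (pvWordy (cs[s]?.getD ' ')) with h | h
        · exact absurd (by simpa using h) hw
        · exact h
      have hstep : pvSLoop cs (s + 1) = s + 1 := by simp [pvSLoop, hwf]
      rw [hstep]
      exact ⟨le_refl _, by omega, Or.inr (by simpa using hwf)⟩

lemma pvELoop_props (cs : List Char) (e : Nat) (he : e ≤ cs.length) :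
    e ≤ pvELoop cs e ∧ pvELoop cs e ≤ cs.length ∧
    (∀ j, e ≤ j → j < pvELoop cs e → pvWordy (cs.getD j ' ') = true) ∧
    (pvELoop cs e = cs.length ∨ pvWordy (cs.getD (pvELoop cs e) ' ') = false) := by
  by_cases h : e < cs.length ∧ pvWordy (cs.getD e ' ') = true
  · have ih := pvELoop_props cs (e + 1) (by omega)
    rw [pvELoop, if_pos h]
    obtain ⟨h1, h2, h3, h4⟩ := ih
    refine ⟨by omega, h2, ?_, h4⟩
    intro j hj1 hj2
    rcases Nat.lt_or_ge j (e + 1) with hj | hj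
    · have : j = e := by omega
      simpa [this] using h.2
    · exact h3 j hj hj2
  · rw [pvELoop, if_neg h]
    rcases Nat.lt_or_ge e cs.length with hlt | hge
    · refine ⟨le_refl _, he, by omega, ?_⟩
      right
      by_contra hc
      exact h ⟨hlt, by simpa using hc⟩
    · exact ⟨le_refl _, he, by omega, Or.inl (by omega)⟩
termination_by cs.length - e
decreasing_by omega

lemma pvEnum_getD (cs : List Char) (k : Nat) (c : Char) (rest : List Char)
    (h : cs.drop k = c :: rest) : k < cs.length ∧ cs.getD k ' ' = c := by
  have hk : k < cs.length := by
    by_contra hc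
    rw [List.drop_eq_nil_of_le (by omega)] at h
    simp at h
  refine ⟨hk, ?_⟩
  have : (cs.drop k).getD 0 ' ' = cs.getD k ' ' := by
    simp [List.getD_eq_getElem?_getD, List.getElem?_drop]
  rw [h] at this
  simpa using this.symm

lemma pvScanB_good (cs : List Char) (idx : Nat) (hidx : idx < cs.length)
    (hw : pvWordy (cs.getD idx ' ') = true) :
    ∀ (suf : List Char) (k start : Nat), cs.drop k = suf → start ≤ k →
    (∀ j, start ≤ j → j < k → pvWordy (cs.getD j ' ') = true) →
    (start = 0 ∨ pvWordy (cs.getD (start - 1) ' ') = false) →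
    (idx < k → start ≤ idx) →
    pvGood cs idx (pvScanB idx cs.length (pvEnum k suf) start).1
      (pvScanB idx cs.length (pvEnum k suf) start).2 := by
  intro suf
  induction suf with
  | nil =>
    intro k start hdrop hsk hall hsb hi4
    have hk : cs.length ≤ k := by
      by_contra hc
      have := List.drop_eq_nil_iff.mp hdrop
      omega
    simp only [pvEnum, pvScanB]
    exact ⟨hi4 (by omega), hidx, le_refl _,
      fun j hj1 hj2 => hall j hj1 (by omega), hsb, Or.inl rfl⟩
  | cons c rest ih =>
    intro k start hdrop hsk hall hsb hi4
    obtain ⟨hk, hck⟩ := pvEnum_getD cs k c rest hdrop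
    have hdrop' : cs.drop (k + 1) = rest := by
      have h2 := congrArg (List.drop 1) hdrop
      rw [List.drop_drop] at h2
      simpa using h2
    simp only [pvEnum, pvScanB]
    by_cases hwc : pvWordy c = true
    · rw [if_pos hwc]
      apply ih (k + 1) start hdrop' (by omega)
      · intro j hj1 hj2
        rcases Nat.lt_or_ge j k with h | h
        · exact hall j hj1 h
        · have : j = k := by omega
          rw [this, hck]; exact hwc
      · exact hsb
      · intro h
        rcases Nat.lt_or_ge idx k with h2 | h2
        · exact hi4 h2
        · have : idx = k := by omega
          omega
    · rw [if_neg hwc]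
      have hne : idx ≠ k := by
        intro h; rw [h, hck] at hw; exact hwc hw
      by_cases hcond : start ≤ idx ∧ idx < k
      · rw [if_pos hcond]
        refine ⟨hcond.1, hcond.2, by omega,
          fun j hj1 hj2 => hall j hj1 (by omega), hsb, ?_⟩
        right; rw [hck]; simpa using hwc
      · rw [if_neg hcond]
        have hki : k < idx := by
          rcases Nat.lt_or_ge idx k with h2 | h2
          · exact absurd ⟨hi4 h2, h2⟩ hcond
          · omega
        apply ih (k + 1) (k + 1) hdrop' (le_refl _)
        · omega
        · right
          simp only [Nat.add_sub_cancel]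
          rw [hck]; simpa using hwc
        · omega

lemma pvA_good (cs : List Char) (idx : Nat) (hidx : idx < cs.length)
    (hw : pvWordy (cs.getD idx ' ') = true) :
    pvGood cs idx (pvSLoop cs idx) (pvELoop cs idx) := by
  obtain ⟨hs1, hs2, hs3⟩ := pvSLoop_props cs idx
  obtain ⟨he1, he2, he3, he4⟩ := pvELoop_props cs idx (by omega)
  have hlt : idx < pvELoop cs idx := by
    rw [pvELoop, if_pos ⟨hidx, hw⟩]
    have := (pvELoop_props cs (idx + 1) (by omega)).1
    omega
  refine ⟨hs1, hlt, he2, ?_, hs3, he4⟩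
  intro j hj1 hj2
  rcases Nat.lt_or_ge j idx with h | h
  · exact hs2 j hj1 h
  · exact he3 j h hj2

-- ===== VERDICT (by name: the statement is the Claim_ definition above) =====
theorem bad_token_span_py_spec : Claim_equal_bad_token_span_py := by
  intro line col _
  unfold Spec_bad_token_span_py bad_token_span_py bad_token_span_py_alt
  by_cases hnil : line.toList = []
  · simp [hnil]
  · have hlen : 0 < line.toList.length := List.length_pos_of_ne_nil hnil
    simp only [hnil, ne_eq, not_false_iff, if_true, if_false]
    set cs := line.toList with hcs
    have hbound : 0 ≤ max 0 (min (col - 1) ((cs.length : Int) - 1)) ∧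
        max 0 (min (col - 1) ((cs.length : Int) - 1)) < (cs.length : Int) := by
      constructor
      · exact le_max_left _ _
      · have h1 : min (col - 1) ((cs.length : Int) - 1) ≤ (cs.length : Int) - 1 :=
          min_le_right _ _
        omega
    set i : Nat := (max 0 (min (col - 1) ((cs.length : Int) - 1))).toNat with hi
    have hilt : i < cs.length := by omega
    by_cases hw : pvWordy (cs.getD i ' ') = true
    · have hB := pvScanB_good cs i hilt hw cs 0 0 (by simp) (le_refl _)
        (by omega) (Or.inl rfl) (by omega)
      have hA := pvA_good cs i hilt hw
      obtain ⟨h1, h2⟩ := pvGood_unique cs i _ _ _ _ hA hB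
      have hw' : pvWordy (cs[i]?.getD ' ') = true := by simpa using hw
      simp [hw', h1, h2]
    · have hwf : pvWordy (cs[i]?.getD ' ') = false := by
        rcases Bool.eq_false_or_eq_true (pvWordy (cs[i]?.getD ' ')) with h | h
        · exact absurd (by simpa using h) hw
        · exact h
      simp [hwf]
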